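-- pv_equiv track=rewrite | github.com/ZGaillard/IFT2125_Devoir4 | fft.py | fft_modulo
-- ===== SOURCE A (Python) =====
-- def fft_modulo(x, omega, m):
--     n = len(x)
--     if n == 1:
--         return x
--     else:
--         x_pair = [x[i] for i in range(n) if i % 2 == 0]
--         x_impair = [x[i] for i in range(n) if i % 2 == 1]
--         y_pair = fft_modulo(x_pair, omega ** 2, m)
--         y_impair = fft_modulo(x_impair, omega ** 2, m)
--         y = [0] * n
--         for i in range(n):
--             y[i] = (y_pair[i % (n // 2)] + omega ** i * y_impair[i % (n // 2)]) % m
--         return y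
-- ===== SOURCE B (Python) =====
-- def fft_modulo(x, omega, m):
--     # Iterative two-pass evaluation: an explicit stack flattens the even/odd
--     # decomposition into a preorder op list, then a value-stack pass folds it
--     # back up; all twiddle factors are kept reduced mod m with a running power.
--     if len(x) == 1:
--         return x
--     stack = [(x, omega % m)]
--     ops = []
--     while stack:
--         s, w = stack.pop()
--         if len(s) == 1:
--             ops.append(("leaf", s, None))
--         else:
--             ops.append(("comb", len(s), w))
--             w2 = w * w % m
--             stack.append((s[1::2], w2))
--             stack.append((s[0::2], w2))
--     vals = []
--     for op in reversed(ops):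
--         if op[0] == "leaf":
--             vals.append(op[1])
--         else:
--             _, n, w = op
--             ye = vals.pop()
--             yo = vals.pop()
--             h = n // 2
--             y = []
--             p = 1
--             for i in range(n):
--                 y.append((ye[i % h] + p * yo[i % h]) % m)
--                 p = p * w % m
--             vals.append(y)
--     return vals.pop()
-- ===== Notes on version B (the rewrite author's own statement) =====
-- stated objective: faster
-- what changed: A is a recursive Cooley-Tukey that computes omega**i as an unbounded bignum at every level; B is non-recursive: an explicit stack flattens the even/odd decomposition into a preorder op list, a second value-stack pass folds the ops back up, and every twiddle factor is kept reduced mod m with a running power, so all multiplications stay on O(log m)-size integers.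
import Mathlib
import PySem

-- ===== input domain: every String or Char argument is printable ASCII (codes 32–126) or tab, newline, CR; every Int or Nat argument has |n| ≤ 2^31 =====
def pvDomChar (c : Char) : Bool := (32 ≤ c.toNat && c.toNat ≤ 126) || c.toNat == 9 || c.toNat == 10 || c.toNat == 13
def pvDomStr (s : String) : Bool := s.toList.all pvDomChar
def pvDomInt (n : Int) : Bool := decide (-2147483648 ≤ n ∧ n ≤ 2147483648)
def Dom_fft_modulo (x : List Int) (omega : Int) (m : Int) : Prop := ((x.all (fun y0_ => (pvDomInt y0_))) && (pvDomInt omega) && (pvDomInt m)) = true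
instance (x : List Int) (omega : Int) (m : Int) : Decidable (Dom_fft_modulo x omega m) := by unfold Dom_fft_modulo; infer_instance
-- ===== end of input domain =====

-- B replaces A's recursion by an explicit-stack two-pass evaluation and keeps every
-- twiddle factor reduced mod m (running power) instead of A's unbounded bignum omega**i.

-- ===== PORT A =====
-- fuel is only a totality guard: Python A recurses forever on x = [] (excluded by Pre_);
-- on every other input the fuel x.length + 1 is never exhausted.
def fftA (fuel : Nat) (x : List Int) (omega : Int) (m : Int) : List Int :=
  match fuel with
  | 0 => []
  | fuel + 1 =>
    let n : Int := PySem.List.len x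
    if n == 1 then x
    else
      -- x_pair / x_impair: [x[i] for i in range(n) if i % 2 == 0/1]; i ∈ range(n) is in range,
      -- so the pyGetD default 0 is never used
      let x_pair := ((PySem.List.pyRange 0 n 1).filter (fun i => PySem.Int.mod i 2 == 0)).map
        (fun i => PySem.List.pyGetD x i 0)
      let x_impair := ((PySem.List.pyRange 0 n 1).filter (fun i => PySem.Int.mod i 2 == 1)).map
        (fun i => PySem.List.pyGetD x i 0)
      let y_pair := fftA fuel x_pair (omega ^ 2) m
      let y_impair := fftA fuel x_impair (omega ^ 2) m
      let h2 := PySem.Int.floordiv n 2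
      -- y = [0]*n; for i in range(n): y[i] = (y_pair[i % (n//2)] + omega**i * y_impair[i % (n//2)]) % m
      -- (omega ** i with i ≥ 0 from range is omega ^ i.toNat)
      (PySem.List.pyRange 0 n 1).foldl
        (fun y i => PySem.List.pySetD y i
          (PySem.Int.mod (PySem.List.pyGetD y_pair (PySem.Int.mod i h2) 0
            + omega ^ i.toNat * PySem.List.pyGetD y_impair (PySem.Int.mod i h2) 0) m))
        (List.replicate n.toNat 0)

def fft_modulo (x : List Int) (omega : Int) (m : Int) : List Int :=
  fftA (x.length + 1) x omega m

-- ===== PORT B =====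
-- ops entries: Sum.inl s = ("leaf", s), Sum.inr (n, w) = ("comb", n, w)
-- pass 1 (the while-loop over `stack`): fuel is only a totality guard; the loop runs
-- exactly 2*len(x)-1 times on the inputs Pre_ admits, so fuel 2*len(x) is never exhausted
def pass1B (m : Int) : Nat → List (List Int × Int) → List (Sum (List Int) (Int × Int)) →
    List (Sum (List Int) (Int × Int))
  | 0, _, ops => ops
  | _ + 1, [], ops => ops
  | fuel + 1, (s, w) :: stack, ops =>
    if PySem.List.len s == 1 then
      pass1B m fuel stack (ops ++ [Sum.inl s])
    else
      -- w2 = w*w % m; stack.append(s[1::2]); stack.append(s[0::2]) → s[0::2] is popped first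
      let w2 := PySem.Int.mod (w * w) m
      pass1B m fuel
        (((PySem.List.slice? s (some 0) none 2).getD [], w2)
          :: ((PySem.List.slice? s (some 1) none 2).getD [], w2) :: stack)
        (ops ++ [Sum.inr (PySem.List.len s, w)])

-- the inner combine loop of pass 2:
-- h = n // 2; y = []; p = 1; for i in range(n): y.append((ye[i%h] + p*yo[i%h]) % m); p = p*w % m
def combB (ye yo : List Int) (n w m : Int) : List Int :=
  let h := PySem.Int.floordiv n 2
  ((PySem.List.pyRange 0 n 1).foldl
    (fun (s : List Int × Int) i =>
      (s.1 ++ [PySem.Int.mod (PySem.List.pyGetD ye (PySem.Int.mod i h) 0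
          + s.2 * PySem.List.pyGetD yo (PySem.Int.mod i h) 0) m],
       PySem.Int.mod (s.2 * w) m))
    ([], 1)).1

-- one step of pass 2 (the for-loop over reversed(ops)); the two vals.pop() calls are
-- never reached with fewer than two values on B's actual runs, the fall-through branch
-- is only a totality guard for that unreachable IndexError
def pass2B (m : Int) (vals : List (List Int)) (op : Sum (List Int) (Int × Int)) :
    List (List Int) :=
  match op with
  | Sum.inl s => s :: vals
  | Sum.inr (n, w) =>
    match vals with
    | ye :: yo :: rest => combB ye yo n w m :: rest
    | _ => vals

def fft_modulo_alt (x : List Int) (omega : Int) (m : Int) : List Int :=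
  if x.length == 1 then x
  else
    let ops := pass1B m (2 * x.length) [(x, PySem.Int.mod omega m)] []
    -- for op in reversed(ops): …  then return vals.pop()
    ((ops.reverse.foldl (pass2B m) []).headD [])

-- ===== PRECONDITION & SPEC =====
-- Pre_ excludes exactly the inputs on which Python A does not return: x = [] (infinite
-- recursion → RecursionError) and m = 0 with len(x) ≥ 2 (ZeroDivisionError from % 0).
def Pre_fft_modulo (x : List Int) (omega : Int) (m : Int) : Prop :=
  x ≠ [] ∧ (m ≠ 0 ∨ x.length = 1)
instance (x : List Int) (omega : Int) (m : Int) : Decidable (Pre_fft_modulo x omega m) := by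
  unfold Pre_fft_modulo; infer_instance

def pvWitness_fft_modulo : List Int × Int × Int := ([1, 2, 3, 4], 2, 5)

def Spec_fft_modulo (x : List Int) (omega : Int) (m : Int) (out : List Int) : Prop := out = fft_modulo_alt x omega m
instance (x : List Int) (omega : Int) (m : Int) (out : List Int) : Decidable (Spec_fft_modulo x omega m out) := by unfold Spec_fft_modulo; infer_instance

-- ===== CLAIM (what is proved, stated in full; the proofs are below) =====
def Claim_equal_fft_modulo : Prop := ∀ (x : List Int) (omega : Int) (m : Int), Dom_fft_modulo x omega m → Pre_fft_modulo x omega m → Spec_fft_modulo x omega m (fft_modulo x omega m)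

-- ===== LEMMAS AND PROOFS =====

-- every-other-element lists: the common value of A's index-parity split and B's slices
def evens : List Int → List Int
  | [] => []
  | [a] => [a]
  | a :: _ :: l => a :: evens l

def odds : List Int → List Int
  | [] => []
  | _ :: l => evens l

lemma evens_length (x : List Int) : (evens x).length = (x.length + 1) / 2 := by
  induction x using evens.induct with
  | case1 => simp [evens]
  | case2 a => simp [evens]
  | case3 a b l ih => simp only [evens, List.length_cons, ih]; omega

lemma odds_length (x : List Int) : (odds x).length = x.length / 2 := by
  cases x with
  | nil => simp [odds]
  | cons a l => simp only [odds, List.length_cons, evens_length]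

lemma map_getD_evens (x : List Int) :
    (List.range ((x.length + 1) / 2)).map (fun k => x[2 * k]?.getD 0) = evens x := by
  induction x using evens.induct with
  | case1 => simp [evens]
  | case2 a => simp [evens]
  | case3 a b l ih =>
    have hlen : ((a :: b :: l).length + 1) / 2 = (l.length + 1) / 2 + 1 := by
      simp only [List.length_cons]; omega
    rw [hlen, List.range_succ_eq_map, List.map_cons, List.map_map]
    have h2 : ∀ k : ℕ, (a :: b :: l)[2 * Nat.succ k]?.getD 0 = l[2 * k]?.getD 0 := by
      intro k
      have : 2 * Nat.succ k = 2 * k + 1 + 1 := by omega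
      simp [this]
    simp [Function.comp_def, evens, h2, ih]

lemma filterMap_evens (x : List Int) :
    (List.range ((x.length + 1) / 2)).filterMap (fun k => x[2 * k]?) = evens x := by
  induction x using evens.induct with
  | case1 => simp [evens]
  | case2 a => simp [evens]
  | case3 a b l ih =>
    have hlen : ((a :: b :: l).length + 1) / 2 = (l.length + 1) / 2 + 1 := by
      simp only [List.length_cons]; omega
    rw [hlen, List.range_succ_eq_map, List.filterMap_cons]
    simp only [List.filterMap_map]
    have h2 : ∀ k : ℕ, (a :: b :: l)[2 * Nat.succ k]? = l[2 * k]? := by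
      intro k
      have : 2 * Nat.succ k = 2 * k + 1 + 1 := by omega
      simp [this]
    simp [evens, h2, ih]

lemma map_getD_odds (x : List Int) :
    (List.range (x.length / 2)).map (fun k => x[2 * k + 1]?.getD 0) = odds x := by
  cases x with
  | nil => simp [odds]
  | cons a l =>
    have : (a :: l).length / 2 = (l.length + 1) / 2 := by simp only [List.length_cons]
    rw [this, odds]
    rw [← map_getD_evens l]
    simp

lemma filterMap_odds (x : List Int) :
    (List.range (x.length / 2)).filterMap (fun k => x[2 * k + 1]?) = odds x := by
  cases x with
  | nil => simp [odds]
  | cons a l =>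
    have : (a :: l).length / 2 = (l.length + 1) / 2 := by simp only [List.length_cons]
    rw [this, odds]
    rw [← filterMap_evens l]
    simp

-- range-parity split (used to turn A's filter over range(n) into the even/odd index lists)
lemma range_filter_parity (n : ℕ) :
    (List.range n).filter (fun k => k % 2 == 0) = (List.range ((n + 1) / 2)).map (fun k => 2 * k)
    ∧ (List.range n).filter (fun k => k % 2 == 1) = (List.range (n / 2)).map (fun k => 2 * k + 1) := by
  induction n with
  | zero => simp
  | succ n ih =>
    obtain ⟨ihe, iho⟩ := ih
    rw [List.range_succ, List.filter_append, List.filter_append, ihe, iho]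
    rcases Nat.even_or_odd n with h | h
    · obtain ⟨c, hc⟩ := h
      have hn2 : n % 2 = 0 := by omega
      constructor
      · have h1 : (n + 1 + 1) / 2 = (n + 1) / 2 + 1 := by omega
        have h2 : 2 * ((n + 1) / 2) = n := by omega
        rw [h1, List.range_succ, List.map_append]
        simp [hn2, h2]
      · have h1 : (n + 1) / 2 = n / 2 := by omega
        rw [h1]
        simp [hn2]
    · obtain ⟨c, hc⟩ := h
      have hn2 : n % 2 = 1 := by omega
      constructor
      · have h1 : (n + 1 + 1) / 2 = (n + 1) / 2 := by omega
        rw [h1]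
        simp [hn2]
      · have h1 : (n + 1) / 2 = n / 2 + 1 := by omega
        have h2 : 2 * (n / 2) + 1 = n := by omega
        rw [h1, List.range_succ, List.map_append]
        simp [hn2, h2]

-- A's even/odd comprehensions are evens/odds
lemma A_split_even (x : List Int) :
    ((PySem.List.pyRange 0 (x.length : Int) 1).filter (fun i => PySem.Int.mod i 2 == 0)).map
      (fun i => PySem.List.pyGetD x i 0) = evens x := by
  rw [PySem.List.pyRange_zero_nat, List.filter_map]
  have hp : ((fun i => PySem.Int.mod i 2 == 0) ∘ fun (k : ℕ) => (k : Int)) = fun k => k % 2 == 0 := by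
    funext k
    simp [Function.comp]
    omega
  rw [hp, (range_filter_parity x.length).1, List.map_map, List.map_map]
  rw [← map_getD_evens x]
  apply List.map_congr_left
  intro k _
  simp only [Function.comp, PySem.List.pyGetD_natCast]
  exact List.getD_eq_getElem?_getD

lemma A_split_odd (x : List Int) :
    ((PySem.List.pyRange 0 (x.length : Int) 1).filter (fun i => PySem.Int.mod i 2 == 1)).map
      (fun i => PySem.List.pyGetD x i 0) = odds x := by
  rw [PySem.List.pyRange_zero_nat, List.filter_map]
  have hp : ((fun i => PySem.Int.mod i 2 == 1) ∘ fun (k : ℕ) => (k : Int)) = fun k => k % 2 == 1 := by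
    funext k
    simp [Function.comp]
    omega
  rw [hp, (range_filter_parity x.length).2, List.map_map, List.map_map]
  rw [← map_getD_odds x]
  apply List.map_congr_left
  intro k _
  simp only [Function.comp, PySem.List.pyGetD_natCast]
  exact List.getD_eq_getElem?_getD

-- B's slices are evens/odds
lemma slice_even (x : List Int) : PySem.List.slice? x (some 0) none 2 = some (evens x) := by
  rw [PySem.List.slice?]
  simp only [PySem.List.sliceIndices]
  norm_num
  have hc : (if 0 < x.length then (((x.length : Int) + 2 - 1) / 2).toNat else 0) = (x.length + 1) / 2 := by
    split <;> omega
  rw [hc]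
  have hi : (fun k : ℕ => x[(2 * (k : Int)).toNat]?) = fun k : ℕ => x[2 * k]? := by
    funext k
    have : ((2 : Int) * (k : Int)).toNat = 2 * k := by omega
    rw [this]
  rw [hi, filterMap_evens]

lemma slice_odd (x : List Int) : PySem.List.slice? x (some 1) none 2 = some (odds x) := by
  cases x with
  | nil => rfl
  | cons a l =>
    rw [PySem.List.slice?]
    simp only [PySem.List.sliceIndices]
    norm_num
    have hc : (if 0 < l.length then (((l.length : Int) + 2 - 1) / 2).toNat else 0)
        = (a :: l).length / 2 := by
      simp only [List.length_cons]
      split <;> omega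
    rw [hc]
    have hi : (fun k : ℕ => (a :: l)[(1 + 2 * (k : Int)).toNat]?) = fun k : ℕ => (a :: l)[2 * k + 1]? := by
      funext k
      have : ((1 : Int) + 2 * (k : Int)).toNat = 2 * k + 1 := by omega
      rw [this]
    rw [hi, filterMap_odds]

-- Python % congruence: fmod depends on the argument only through its residue
lemma fmod_congr {a b m : Int} (h : a % m = b % m) : Int.fmod a m = Int.fmod b m := by
  have hd : (m ∣ a) ↔ (m ∣ b) := by
    rw [Int.dvd_iff_emod_eq_zero, Int.dvd_iff_emod_eq_zero, h]
  simp [Int.fmod_eq_emod, h, hd]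

lemma fmod_modeq (a m : Int) : Int.ModEq m (Int.fmod a m) a := by
  unfold Int.ModEq
  rw [Int.fmod_eq_emod]
  split
  · simp
  · have h1 : a % m + m = a % m + m * 1 := by ring
    rw [h1, Int.add_mul_emod_self_left, Int.emod_emod_of_dvd _ dvd_rfl]

-- A's write-into-[0]*n loop is a map over range(n)
lemma foldl_set_range (g : Int → Int) (n : Int) :
    ∀ (a : Int) (y : List Int), 0 ≤ a → y.length = n.toNat →
    (PySem.List.pyRange a n 1).foldl (fun y i => PySem.List.pySetD y i (g i)) y
      = y.take a.toNat ++ (PySem.List.pyRange a n 1).map g := by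
  intro a y
  induction hk : (n - a).toNat generalizing a y with
  | zero =>
    intro ha hy
    rw [PySem.List.pyRange_one_eq_nil (by omega)]
    simp
    omega
  | succ k ih =>
    intro ha hy
    have han : a < n := by omega
    rw [PySem.List.pyRange_one_cons han]
    simp only [List.foldl_cons, List.map_cons]
    rw [PySem.List.pySetD_of_nonneg y (g a) ha]
    have hlt : a.toNat < y.length := by omega
    rw [ih (a + 1) _ (by omega) (by omega) (by simp [hy])]
    rw [List.set_eq_take_append_cons_drop]
    simp only [if_pos hlt]
    have h1 : (a + 1).toNat = a.toNat + 1 := by omega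
    rw [h1]
    have h2 : (y.take a.toNat).length = a.toNat := by simp; omega
    rw [List.take_append]
    rw [h2]
    simp [List.take_take]

-- B's append-with-running-power loop, generically
def mapPow (f : Int → Int → Int) (upd : Int → Int) : List Int → Int → List Int
  | [], _ => []
  | i :: is, p => f i p :: mapPow f upd is (upd p)

lemma foldl_pair (f : Int → Int → Int) (upd : Int → Int) :
    ∀ (is : List Int) (acc : List Int) (p : Int),
    (is.foldl (fun (s : List Int × Int) i => (s.1 ++ [f i s.2], upd s.2)) (acc, p)).1
      = acc ++ mapPow f upd is p := by
  intro is
  induction is with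
  | nil => intro acc p; simp [mapPow]
  | cons i is ih => intro acc p; simp [mapPow, ih]

-- the running power tracks omega ** i modulo m
lemma mapPow_eq_map (u v : Int → Int) (ω w m : Int) (hw : Int.ModEq m w ω) (n : Int) :
    ∀ (a p : Int), 0 ≤ a → Int.ModEq m p (ω ^ a.toNat) →
    mapPow (fun i p => Int.fmod (u i + p * v i) m) (fun p => Int.fmod (p * w) m)
        (PySem.List.pyRange a n 1) p
      = (PySem.List.pyRange a n 1).map (fun i => Int.fmod (u i + ω ^ i.toNat * v i) m) := by
  intro a p
  induction hk : (n - a).toNat generalizing a p with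
  | zero =>
    intro ha hp
    rw [PySem.List.pyRange_one_eq_nil (by omega)]
    rfl
  | succ k ih =>
    intro ha hp
    have han : a < n := by omega
    rw [PySem.List.pyRange_one_cons han]
    rw [List.map_cons, mapPow]
    congr 1
    · exact fmod_congr ((hp.mul_right (v a)).add_left (u a))
    · apply ih (a + 1) _ (by omega) (by omega)
      have h1 : (a + 1).toNat = a.toNat + 1 := by omega
      rw [h1, pow_succ]
      exact (fmod_modeq (p * w) m).trans (hp.mul hw)

-- the recursive reference value of B's machine: the reduced-twiddle FFT, by structural
-- well-founded recursion (proof-side helper only)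
def gfft (m : Int) (s : List Int) (w : Int) : List Int :=
  if h : s.length ≤ 1 then s
  else
    have he : (evens s).length < s.length := by rw [evens_length]; omega
    have ho : (odds s).length < s.length := by rw [odds_length]; omega
    combB (gfft m (evens s) (PySem.Int.mod (w * w) m))
          (gfft m (odds s) (PySem.Int.mod (w * w) m))
          (PySem.List.len s) w m
termination_by s.length

-- the preorder op list B's pass 1 produces for one segment
def preOps (m : Int) (s : List Int) (w : Int) : List (Sum (List Int) (Int × Int)) :=
  if h : s.length ≤ 1 then [Sum.inl s]
  else
    have he : (evens s).length < s.length := by rw [evens_length]; omega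
    have ho : (odds s).length < s.length := by rw [odds_length]; omega
    Sum.inr (PySem.List.len s, w)
      :: (preOps m (evens s) (PySem.Int.mod (w * w) m)
          ++ preOps m (odds s) (PySem.Int.mod (w * w) m))
termination_by s.length

-- pass 1 flattens the whole stack into the concatenated preorder op lists
lemma pass1B_eq (m : Int) :
    ∀ (fuel : Nat) (stack : List (List Int × Int)) (ops : List (Sum (List Int) (Int × Int))),
    (∀ p ∈ stack, p.1 ≠ []) →
    (stack.map (fun p => 2 * p.1.length - 1)).sum ≤ fuel →
    pass1B m fuel stack ops = ops ++ (stack.map (fun p => preOps m p.1 p.2)).flatten := by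
  intro fuel
  induction fuel with
  | zero =>
    intro stack ops hne hm
    cases stack with
    | nil => simp [pass1B]
    | cons p rest =>
      exfalso
      have := hne p (List.mem_cons_self ..)
      have : p.1.length ≠ 0 := by simpa [List.length_eq_zero_iff] using this
      simp only [List.map_cons, List.sum_cons] at hm
      omega
  | succ fuel ih =>
    intro stack ops hne hm
    cases stack with
    | nil => simp [pass1B]
    | cons p rest =>
      obtain ⟨s, w⟩ := p
      have hs : s ≠ [] := hne (s, w) (List.mem_cons_self ..)
      have hslen : 1 ≤ s.length := by
        have : s.length ≠ 0 := by simpa [List.length_eq_zero_iff] using hs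
        omega
      simp only [List.map_cons, List.sum_cons] at hm
      by_cases h1 : s.length = 1
      · have hb : (PySem.List.len s == (1 : Int)) = true := by
          simp [PySem.List.len_eq, h1]
        rw [pass1B, hb]
        simp only [if_true]
        rw [ih rest (ops ++ [Sum.inl s]) (fun p hp => hne p (List.mem_cons_of_mem _ hp))
          (by omega)]
        have hpre : preOps m s w = [Sum.inl s] := by
          rw [preOps]; simp [h1]
        simp [hpre]
      · have h2 : 2 ≤ s.length := by omega
        have hb : (PySem.List.len s == (1 : Int)) = false := by
          simp [PySem.List.len_eq]; omega
        rw [pass1B, hb]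
        simp only [Bool.false_eq_true, if_false]
        rw [slice_even s, slice_odd s]
        simp only [Option.getD_some]
        have hene : evens s ≠ [] := by
          have := evens_length s
          intro hc; rw [hc] at this; simp at this; omega
        have hone : odds s ≠ [] := by
          have := odds_length s
          intro hc; rw [hc] at this; simp at this; omega
        rw [ih _ _ (by
            intro p hp
            simp only [List.mem_cons] at hp
            rcases hp with rfl | rfl | hp
            · simpa using hene
            · simpa using hone
            · exact hne p (List.mem_cons_of_mem _ hp))
          (by
            simp only [List.map_cons, List.sum_cons, evens_length, odds_length]
            omega)]
        have hpre : preOps m s w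
            = Sum.inr (PySem.List.len s, w)
              :: (preOps m (evens s) (PySem.Int.mod (w * w) m)
                  ++ preOps m (odds s) (PySem.Int.mod (w * w) m)) := by
          rw [preOps]; simp [show ¬ s.length ≤ 1 by omega]
        simp [hpre]

-- pass 2 over one reversed preorder block pushes exactly the reference value
lemma pass2B_preOps (m : Int) :
    ∀ (s : List Int) (w : Int) (vals : List (List Int)),
    (preOps m s w).reverse.foldl (pass2B m) vals = gfft m s w :: vals := by
  intro s
  induction hn : s.length using Nat.strong_induction_on generalizing s with
  | _ n ih =>
    intro w vals
    by_cases h1 : s.length ≤ 1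
    · rw [preOps, gfft]
      simp [h1, pass2B]
    · have he : (evens s).length < s.length := by rw [evens_length]; omega
      have ho : (odds s).length < s.length := by rw [odds_length]; omega
      rw [preOps, gfft]
      simp only [dif_neg h1]
      rw [List.reverse_cons, List.reverse_append, List.foldl_append, List.foldl_append]
      rw [ih _ (by omega) _ rfl, ih _ (by omega) _ rfl]
      simp [pass2B]

-- the induction engine: A and B's reference value agree for congruent twiddle arguments
lemma main_lemma :
    ∀ (fuel : Nat) (x : List Int) (ω w m : Int), x ≠ [] → x.length ≤ fuel →
    Int.ModEq m ω w → fftA fuel x ω m = gfft m x w := by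
  intro fuel
  induction fuel with
  | zero =>
    intro x ω w m hx hlen _
    exfalso
    have : x.length ≠ 0 := by simpa [List.length_eq_zero_iff] using hx
    omega
  | succ fuel ih =>
    intro x ω w m hx hlen hω
    have hslen : 1 ≤ x.length := by
      have : x.length ≠ 0 := by simpa [List.length_eq_zero_iff] using hx
      omega
    rw [fftA, gfft]
    simp only [PySem.List.len_eq]
    by_cases h1 : x.length = 1
    · simp [h1]
    · have h2 : 2 ≤ x.length := by omega
      have hne : ((x.length : Int) == 1) = false := by simp; omega
      rw [hne]
      simp only [Bool.false_eq_true, if_false, dif_neg (show ¬ x.length ≤ 1 by omega)]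
      rw [A_split_even x, A_split_odd x]
      have hene : evens x ≠ [] := by
        have := evens_length x
        intro hc; rw [hc] at this; simp at this; omega
      have hone : odds x ≠ [] := by
        have := odds_length x
        intro hc; rw [hc] at this; simp at this; omega
      have hsq : Int.ModEq m (ω ^ 2) (PySem.Int.mod (w * w) m) := by
        have : Int.ModEq m (w * w) (PySem.Int.mod (w * w) m) := by
          simpa [PySem.Int.mod] using (fmod_modeq (w * w) m).symm
        calc Int.ModEq m (ω ^ 2) (w * w) := by rw [sq]; exact hω.mul hω
          _ ≡ PySem.Int.mod (w * w) m [ZMOD m] := this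
      have hel : (evens x).length ≤ fuel := by rw [evens_length]; omega
      have hol : (odds x).length ≤ fuel := by rw [odds_length]; omega
      rw [ih (evens x) (ω ^ 2) (PySem.Int.mod (w * w) m) m hene hel hsq]
      rw [ih (odds x) (ω ^ 2) (PySem.Int.mod (w * w) m) m hone hol hsq]
      set ye := gfft m (evens x) (PySem.Int.mod (w * w) m) with hye
      set yo := gfft m (odds x) (PySem.Int.mod (w * w) m) with hyo
      simp only [combB]
      set h2i := PySem.Int.floordiv (x.length : Int) 2 with hh2
      rw [foldl_set_range
            (fun i => PySem.Int.mod (PySem.List.pyGetD ye (PySem.Int.mod i h2i) 0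
              + ω ^ i.toNat * PySem.List.pyGetD yo (PySem.Int.mod i h2i) 0) m)
            (x.length : Int) 0 (List.replicate ((x.length : Int)).toNat 0) le_rfl (by simp)]
      rw [foldl_pair
            (fun i p => PySem.Int.mod (PySem.List.pyGetD ye (PySem.Int.mod i h2i) 0
              + p * PySem.List.pyGetD yo (PySem.Int.mod i h2i) 0) m)
            (fun p => PySem.Int.mod (p * w) m)
            (PySem.List.pyRange 0 (x.length : Int) 1) [] 1]
      have hw' : Int.ModEq m w ω := hω.symm
      have := mapPow_eq_map
            (fun i => PySem.List.pyGetD ye (PySem.Int.mod i h2i) 0)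
            (fun i => PySem.List.pyGetD yo (PySem.Int.mod i h2i) 0)
            ω w m hw' (x.length : Int) 0 1 le_rfl (by norm_num [Int.ModEq])
      simp only [PySem.Int.mod] at this ⊢
      rw [this]
      simp

-- ===== VERDICT (by name: the statement is the Claim_ definition above) =====
theorem fft_modulo_spec : Claim_equal_fft_modulo := by
  intro x omega m _ hpre
  obtain ⟨hx, _⟩ := hpre
  have hslen : 1 ≤ x.length := by
    have : x.length ≠ 0 := by simpa [List.length_eq_zero_iff] using hx
    omega
  unfold Spec_fft_modulo fft_modulo fft_modulo_alt
  by_cases h1 : x.length = 1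
  · have hb : (x.length == 1) = true := by simp [h1]
    rw [hb]
    simp only [if_true]
    rw [fftA]
    simp [PySem.List.len_eq, h1]
  · have hb : (x.length == 1) = false := by simp; omega
    rw [hb]
    simp only [Bool.false_eq_true, if_false]
    rw [pass1B_eq m (2 * x.length) [(x, PySem.Int.mod omega m)] []
          (by intro p hp; simp only [List.mem_cons, List.not_mem_nil, or_false] at hp; simpa [hp] using hx)
          (by simp)]
    simp only [List.map_cons, List.map_nil, List.flatten_cons, List.flatten_nil,
      List.append_nil, List.nil_append]
    rw [pass2B_preOps m x (PySem.Int.mod omega m) []]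
    simp only [List.headD_cons]
    exact main_lemma (x.length + 1) x omega (PySem.Int.mod omega m) m hx (by omega)
      (by simpa [PySem.Int.mod] using (fmod_modeq omega m).symm)
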